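-- pv_equiv track=rewrite | github.com/sandeepnavale/Algorithms | Programs/remAna.py | funWithAnagrams
-- ===== SOURCE A (Python) =====
-- def funWithAnagrams(s):
--     op = []
--     for i in range(len(s)):
--         for j in range(i + 1, len(s)):
--             if ''.join(sorted(s[i])) == ''.join(sorted(s[j])):
--                 op.append(s[i])
--                 op.append(s[j])
--
--     for e in op:
--         if e in s:
--             s.remove(e)
--     return s
-- ===== SOURCE B (Python) =====
-- def funWithAnagrams(s):
--     counts = {}
--     for x in s:
--         k = ''.join(sorted(x))
--         counts[k] = counts.get(k, 0) + 1
--     s[:] = [x for x in s if counts[''.join(sorted(x))] == 1]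
--     return s
-- ===== Notes on version B (the rewrite author's own statement) =====
-- stated objective: faster
-- what changed: B replaces A's O(n^2) all-pairs anagram comparison plus a repeated-remove loop by a single pass that counts each signature ''.join(sorted(x)) in a dict and then keeps exactly the elements whose signature count is 1 (rebuilt in place with s[:]=...).
import Mathlib
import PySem

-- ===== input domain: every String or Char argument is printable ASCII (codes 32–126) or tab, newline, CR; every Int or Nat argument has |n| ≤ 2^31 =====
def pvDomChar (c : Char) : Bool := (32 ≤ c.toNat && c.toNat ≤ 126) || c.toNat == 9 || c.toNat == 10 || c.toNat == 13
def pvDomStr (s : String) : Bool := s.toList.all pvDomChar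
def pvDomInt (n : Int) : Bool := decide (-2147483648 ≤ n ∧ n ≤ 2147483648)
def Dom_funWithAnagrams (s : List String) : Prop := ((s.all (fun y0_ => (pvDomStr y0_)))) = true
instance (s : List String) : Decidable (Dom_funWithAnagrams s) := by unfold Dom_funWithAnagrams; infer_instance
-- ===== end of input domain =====

-- B replaces A's O(n^2) pairwise anagram scan + remove loop by a one-pass signature-frequency table and a filter.
-- Both Pythons mutate the argument list in place (A via remove, B via s[:]=…); the equivalence proved is about the return value.

-- ===== PORT A =====
-- shared helper: ''.join(sorted(x)) — computed identically by both Pythons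
def pvSig (x : String) : String :=
  String.ofList (PySem.Chars.join [] ((PySem.List.sorted x.toList (fun c => c) false).map (fun c => [c])))

def funWithAnagrams (s : List String) : List String :=
  let op : List String :=
    (PySem.List.pyRange 0 (s.length : Int) 1).foldl (fun op i =>
      (PySem.List.pyRange (i + 1) (s.length : Int) 1).foldl (fun op j =>
        if pvSig (PySem.List.pyGetD s i "") == pvSig (PySem.List.pyGetD s j "") then
          op ++ [PySem.List.pyGetD s i ""] ++ [PySem.List.pyGetD s j ""]
        else op) op) []
  op.foldl (fun acc e =>
    if acc.contains e then (PySem.List.remove? acc e).getD acc else acc) s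

-- ===== PORT B =====
def funWithAnagrams_alt (s : List String) : List String :=
  let counts : PySem.Dict String Int :=
    s.foldl (fun d x =>
      let k := pvSig x
      d.insert k (d.getD k 0 + 1)) PySem.Dict.empty
  s.filter (fun x => counts.getD (pvSig x) 0 == 1)

-- ===== PRECONDITION & SPEC =====
def Spec_funWithAnagrams (s : List String) (out : List String) : Prop := out = funWithAnagrams_alt s
instance (s : List String) (out : List String) : Decidable (Spec_funWithAnagrams s out) := by unfold Spec_funWithAnagrams; infer_instance

-- ===== CLAIM (what is proved, stated in full; the proofs are below) =====
def Claim_equal_funWithAnagrams : Prop := ∀ (s : List String), Dom_funWithAnagrams s → Spec_funWithAnagrams s (funWithAnagrams s)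

-- ===== LEMMAS AND PROOFS =====

-- number of elements of s sharing v's anagram signature
def pvKc (s : List String) (v : String) : Nat := (s.map pvSig).count (pvSig v)

-- recursive characterisation of A's `op` list
def pvOp : List String → List String
  | [] => []
  | x :: t => (t.filter (fun y => pvSig x == pvSig y)).flatMap (fun y => [x, y]) ++ pvOp t

-- per-index contribution of A's inner loop
def pvH (s : List String) (i : Int) : List String :=
  ((s.drop (i + 1).toNat).filter (fun y => pvSig (PySem.List.pyGetD s i "") == pvSig y)).flatMap
    (fun y => [PySem.List.pyGetD s i "", y])

theorem pvInner_eq (v : String) (l : List String) (acc : List String) :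
    l.foldl (fun op y => if pvSig v == pvSig y then op ++ [v] ++ [y] else op) acc
      = acc ++ (l.filter (fun y => pvSig v == pvSig y)).flatMap (fun y => [v, y]) := by
  induction l generalizing acc with
  | nil => simp
  | cons y t ih =>
    rw [List.foldl_cons, List.filter_cons]
    by_cases h : (pvSig v == pvSig y) = true
    · rw [if_pos h, if_pos h, ih, List.flatMap_cons]
      simp
    · rw [if_neg h, if_neg h, ih]

theorem pvOpA_eq (s : List String) :
    (PySem.List.pyRange 0 (s.length : Int) 1).foldl (fun op i =>
      (PySem.List.pyRange (i + 1) (s.length : Int) 1).foldl (fun op j =>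
        if pvSig (PySem.List.pyGetD s i "") == pvSig (PySem.List.pyGetD s j "") then
          op ++ [PySem.List.pyGetD s i ""] ++ [PySem.List.pyGetD s j ""]
        else op) op) []
      = (PySem.List.pyRange 0 (s.length : Int) 1).flatMap (pvH s) := by
  rw [PySem.List.foldl_congr_mem _ _ (fun op i => op ++ pvH s i) []
    (by
      intro acc i hi
      have h0 : (0:Int) ≤ i := (PySem.List.mem_pyRange_one.mp hi).1
      rw [PySem.List.foldl_pyRange_pyGetD' s ""
        (fun op y => if pvSig (PySem.List.pyGetD s i "") == pvSig y then op ++ [PySem.List.pyGetD s i ""] ++ [y] else op)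
        acc (a := i + 1) (by omega)]
      rw [pvInner_eq]
      rfl)]
  rw [PySem.List.foldl_append_eq_flatMap]
  simp

theorem pvH_shift (x : String) (t : List String) (k : Nat) :
    pvH (x :: t) (1 + (k : Int)) = pvH t (k : Int) := by
  have h1 : (1 + (k : Int)) = ((k + 1 : Nat) : Int) := by push_cast; ring
  simp only [pvH, h1, PySem.List.pyGetD_natCast]
  have h2 : (((k + 1 : Nat) : Int) + 1).toNat = (k + 1) + 1 := by omega
  have h3 : (((k : Nat) : Int) + 1).toNat = k + 1 := by omega
  rw [h2, h3, List.getD_cons_succ, List.drop_succ_cons]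

theorem pvFlatMap_congr {α β : Type} (l : List α) (f g : α → List β)
    (h : ∀ x ∈ l, f x = g x) : l.flatMap f = l.flatMap g := by
  induction l with
  | nil => rfl
  | cons x t ih =>
    simp only [List.flatMap_cons]
    rw [h x (by simp), ih (fun y hy => h y (by simp [hy]))]

theorem pvFlatMap_pvH (s : List String) :
    (PySem.List.pyRange 0 (s.length : Int) 1).flatMap (pvH s) = pvOp s := by
  induction s with
  | nil => simp [pvOp, PySem.List.pyRange_one_eq_nil]
  | cons x t ih =>
    rw [PySem.List.pyRange_one_cons (by exact_mod_cast Nat.succ_pos t.length)]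
    simp only [List.flatMap_cons]
    have hhead : pvH (x :: t) 0 = (t.filter (fun y => pvSig x == pvSig y)).flatMap (fun y => [x, y]) := by
      simp [pvH, PySem.List.pyGetD_ofNat']
    have htail : (PySem.List.pyRange (0 + 1) ((x :: t).length : Int) 1).flatMap (pvH (x :: t)) = pvOp t := by
      rw [← ih]
      rw [PySem.List.pyRange_one (0+1) ((x :: t).length : Int), PySem.List.pyRange_one 0 (t.length : Int)]
      have hlen1 : (((x :: t).length : Int) - (0 + 1)).toNat = t.length := by simp
      have hlen2 : ((t.length : Int) - 0).toNat = t.length := by simp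
      rw [hlen1, hlen2, List.flatMap_map, List.flatMap_map]
      exact pvFlatMap_congr _ _ _ (fun k _ => by
        simpa using pvH_shift x t k)
    rw [hhead, htail, pvOp]

theorem pvCount_flatMap_pair (x v : String) (P : List String) :
    (P.flatMap (fun y => [x, y])).count v
      = (if x == v then P.length else 0) + P.count v := by
  induction P with
  | nil => simp
  | cons y Q ih =>
    have hxy : List.count v [x, y] = (if x == v then 1 else 0) + (if y == v then 1 else 0) := by
      rw [List.count_cons, List.count_cons, List.count_nil]
      split_ifs <;> omega
    simp only [List.flatMap_cons, List.count_append, ih, List.length_cons, List.count_cons, hxy]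
    split_ifs <;> omega

theorem pvCount_filter_sig (x v : String) (t : List String) :
    (t.filter (fun y => pvSig x == pvSig y)).count v
      = if pvSig x == pvSig v then t.count v else 0 := by
  induction t with
  | nil => simp
  | cons y Q ih =>
    rw [List.filter_cons]
    by_cases hy : (pvSig x == pvSig y) = true
    · rw [if_pos hy, List.count_cons, ih, List.count_cons]
      by_cases hv : (pvSig x == pvSig v) = true
      · rw [if_pos hv, if_pos hv]
      · rw [if_neg hv, if_neg hv]
        have hz : (y == v) = false := by
          by_cases hyv : y = v
          · subst hyv; exact absurd hy hv
          · simp [hyv]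
        rw [hz]; simp
    · rw [if_neg hy, ih, List.count_cons]
      by_cases hv : (pvSig x == pvSig v) = true
      · rw [if_pos hv, if_pos hv]
        have hz : (y == v) = false := by
          by_cases hyv : y = v
          · subst hyv; exact absurd hv hy
          · simp [hyv]
        rw [hz]; simp
      · rw [if_neg hv, if_neg hv]

theorem pvMem_opList (v : String) (s : List String) :
    v ∈ pvOp s ↔ v ∈ s ∧ 2 ≤ pvKc s v := by
  induction s with
  | nil => simp [pvOp, pvKc]
  | cons x t ih =>
    have hkc : pvKc (x :: t) v = pvKc t v + (if pvSig x == pvSig v then 1 else 0) := by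
      rw [pvKc, pvKc, List.map_cons, List.count_cons]
    have hex : (0 < pvKc t v) ↔ ∃ y ∈ t, pvSig y = pvSig v := by
      rw [pvKc, List.count_pos_iff]
      exact List.mem_map
    rw [pvOp, List.mem_append, List.mem_flatMap, List.mem_cons, hkc]
    constructor
    · rintro (⟨y, hy, hvy⟩ | hv)
      · obtain ⟨hyt, hsig⟩ := List.mem_filter.mp hy
        have hvc : v = x ∨ v = y := by simpa using hvy
        rcases hvc with rfl | rfl
        · refine ⟨Or.inl rfl, ?_⟩
          have h1 : 0 < pvKc t v := hex.mpr ⟨y, hyt, (by simpa using hsig : pvSig v = pvSig y).symm⟩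
          rw [if_pos (by simp)]
          omega
        · refine ⟨Or.inr hyt, ?_⟩
          have h1 : 0 < pvKc t v := hex.mpr ⟨v, hyt, rfl⟩
          rw [if_pos hsig]
          omega
      · obtain ⟨hvt, hk⟩ := ih.mp hv
        refine ⟨Or.inr hvt, ?_⟩
        split_ifs <;> omega
    · rintro ⟨hvx | hvt, hk⟩
      · subst hvx
        rw [if_pos (by simp)] at hk
        have h1 : 0 < pvKc t v := by omega
        obtain ⟨y, hyt, hys⟩ := hex.mp h1
        exact Or.inl ⟨y, List.mem_filter.mpr ⟨hyt, by simp [hys]⟩, by simp⟩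
      · by_cases hsx : (pvSig x == pvSig v) = true
        · exact Or.inl ⟨v, List.mem_filter.mpr ⟨hvt, hsx⟩, by simp⟩
        · rw [if_neg hsx] at hk
          exact Or.inr (ih.mpr ⟨hvt, by omega⟩)

theorem pvCount_opList (v : String) (s : List String) (hv : v ∈ pvOp s) :
    s.count v ≤ (pvOp s).count v := by
  induction s with
  | nil => simp [pvOp] at hv
  | cons x t ih =>
    rw [pvOp] at hv
    rw [pvOp, List.count_append, pvCount_flatMap_pair, pvCount_filter_sig, List.count_cons]
    by_cases hsig : (pvSig x == pvSig v) = true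
    · by_cases hvx : (x == v) = true
      · simp only [if_pos hvx, if_pos hsig]
        by_cases hP : t.filter (fun y => pvSig x == pvSig y) = []
        · have hop : v ∈ pvOp t := by
            rcases List.mem_append.mp hv with h | h
            · rw [hP] at h; simp at h
            · exact h
          have hpos : 0 < List.count v (pvOp t) := List.count_pos_iff.mpr hop
          simp only [hP, List.length_nil]
          omega
        · have hlen : 0 < (t.filter (fun y => pvSig x == pvSig y)).length :=
            List.length_pos_iff.mpr hP
          omega
      · simp only [if_neg hvx, if_pos hsig]
        omega
    · have hvx : (x == v) = false := by
        by_cases h : x = v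
        · subst h; exact absurd (by simp) hsig
        · simp [h]
      simp only [hvx, if_neg hsig, Bool.false_eq_true, if_false]
      have hop : v ∈ pvOp t := by
        rcases List.mem_append.mp hv with h | h
        · rcases List.mem_flatMap.mp h with ⟨y, hy, hvy⟩
          rcases List.mem_filter.mp hy with ⟨hyt, hsy⟩
          have hvc : v = x ∨ v = y := by simpa using hvy
          rcases hvc with rfl | rfl
          · simp at hvx
          · exact absurd hsy hsig
        · exact h
      have := ih hop
      omega

theorem pvFilter_erase_of_neg {p : String → Bool} (s : List String) (e : String)
    (hpe : p e = false) : (s.erase e).filter p = s.filter p := by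
  induction s with
  | nil => rfl
  | cons x t ih =>
    by_cases hx : x = e
    · subst hx; simp [List.erase_cons_head, hpe]
    · rw [List.erase_cons_tail (by simp [hx])]
      simp only [List.filter_cons, ih]

theorem pvFilter_erase_count_one (p : String → Bool) (s : List String) (e : String)
    (hc : s.count e ≤ 1) :
    (s.erase e).filter p = s.filter (fun x => !(x == e) && p x) := by
  induction s with
  | nil => rfl
  | cons x t ih =>
    by_cases hx : (x == e) = true
    · have hxe : x = e := by simpa using hx
      subst hxe
      rw [List.erase_cons_head, List.filter_cons, if_neg (by simp)]
      have ht : x ∉ t := by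
        rw [List.count_cons] at hc
        intro hmem
        have hpos : 0 < List.count x t := List.count_pos_iff.mpr hmem
        simp at hc
        omega
      refine List.filter_congr (fun y hy => ?_)
      have hz : (y == x) = false := by
        by_cases hq : y = x
        · subst hq; exact absurd hy ht
        · simp [hq]
      simp [hz]
    · rw [List.erase_cons_tail hx, List.filter_cons, List.filter_cons]
      have hxf : (x == e) = false := by simpa using hx
      have hct : t.count e ≤ 1 := by
        rw [List.count_cons, hxf] at hc
        simpa using hc
      rw [ih hct]
      simp [hxf]

theorem pvRemoveFold (op : List String) : ∀ (s : List String),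
    (∀ v ∈ op, s.count v ≤ op.count v) →
    op.foldl (fun acc e => if acc.contains e then (PySem.List.remove? acc e).getD acc else acc) s
      = s.filter (fun x => !op.contains x) := by
  induction op with
  | nil => intro s _; simp
  | cons e rest ih =>
    intro s h
    rw [List.foldl_cons]
    by_cases he : e ∈ s
    · rw [if_pos (List.contains_iff_mem.mpr he), PySem.List.remove?_eq_some_erase s e he, Option.getD_some]
      rw [ih (s.erase e) (by
        intro v hv
        have hcv := h v (List.mem_cons_of_mem _ hv)
        rw [List.count_cons] at hcv
        rw [List.count_erase]
        by_cases hb : (e == v) = true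
        · rw [if_pos hb] at hcv ⊢; omega
        · rw [if_neg hb] at hcv ⊢; omega)]
      by_cases her : e ∈ rest
      · rw [pvFilter_erase_of_neg s e (by simpa using her)]
        refine List.filter_congr (fun x hx => ?_)
        by_cases hxe : x = e
        · subst hxe
          simp
          exact her
        · simp [hxe]
      · have hc1 : s.count e ≤ 1 := by
          have h0 := h e List.mem_cons_self
          rw [List.count_cons, List.count_eq_zero_of_not_mem her] at h0
          simpa using h0
        rw [pvFilter_erase_count_one _ s e hc1]
        refine List.filter_congr (fun x hx => ?_)
        by_cases hq : x = e
        · subst hq; simp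
        · simp [hq]
    · rw [if_neg (by simpa [List.contains_iff_mem] using he)]
      rw [ih s (by
        intro v hv
        have hcv := h v (List.mem_cons_of_mem _ hv)
        rw [List.count_cons] at hcv
        by_cases hb : (e == v) = true
        · have hev : e = v := by simpa using hb
          rw [← hev, List.count_eq_zero_of_not_mem he]
          omega
        · rw [if_neg hb] at hcv; omega)]
      refine List.filter_congr (fun x hx => ?_)
      by_cases hq : x = e
      · subst hq; exact absurd hx he
      · simp [hq]

theorem pvCountB (s : List String) (v : String) :
    (s.foldl (fun d x => d.insert (pvSig x) (d.getD (pvSig x) 0 + 1))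
        (PySem.Dict.empty : PySem.Dict String Int)).getD (pvSig v) 0
      = (pvKc s v : Int) := by
  have hfold : s.foldl (fun d x => d.insert (pvSig x) (d.getD (pvSig x) 0 + 1))
        (PySem.Dict.empty : PySem.Dict String Int)
      = (s.map pvSig).foldl (fun d k => d.insert k (d.getD k 0 + 1)) PySem.Dict.empty :=
    (List.foldl_map (f := pvSig)
      (g := fun (d : PySem.Dict String Int) k => d.insert k (d.getD k 0 + 1))).symm
  rw [hfold, PySem.Dict.getD_foldl_insert_add_one]
  simp [pvKc]

theorem pvMain (s : List String) : funWithAnagrams s = funWithAnagrams_alt s := by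
  simp only [funWithAnagrams, funWithAnagrams_alt]
  rw [pvOpA_eq, pvFlatMap_pvH]
  rw [pvRemoveFold (pvOp s) s (fun v hv => pvCount_opList v s hv)]
  refine List.filter_congr (fun x hx => ?_)
  rw [pvCountB s x]
  have h1 : 0 < pvKc s x := by
    rw [pvKc]
    exact List.count_pos_iff.mpr (List.mem_map.mpr ⟨x, hx, rfl⟩)
  have hmem : x ∈ pvOp s ↔ 2 ≤ pvKc s x := (pvMem_opList x s).trans (and_iff_right hx)
  by_cases h2 : 2 ≤ pvKc s x
  · have hc : (pvOp s).contains x = true := List.contains_iff_mem.mpr (hmem.mpr h2)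
    have hne : (pvKc s x : Int) ≠ 1 := by omega
    rw [hc, show ((pvKc s x : Int) == 1) = false from by simpa using hne]
    rfl
  · have hk1 : pvKc s x = 1 := by omega
    have hnm : x ∉ pvOp s := fun hm => h2 (hmem.mp hm)
    have hc : (pvOp s).contains x = false := by
      cases hb : (pvOp s).contains x
      · rfl
      · exact absurd (List.contains_iff_mem.mp hb) hnm
    rw [hc, show ((pvKc s x : Int) == 1) = true from by simp [hk1]]
    rfl

-- ===== VERDICT (by name: the statement is the Claim_ definition above) =====
theorem funWithAnagrams_spec : Claim_equal_funWithAnagrams := by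
  intro s _
  exact pvMain s
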